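-- pv_equiv track=rewrite | github.com/MrBrantCode/unitest_baseline | mut_generate/mist_train_taco/taco_7482/solution.py | find_minimum_additional_weight
-- ===== SOURCE A (Python) =====
-- def find_minimum_additional_weight(n, m, amounts, weights):
--     # Create a dictionary to track the possible sums and differences of weights
--     d = {0: 1}
--
--     # Populate the dictionary with all possible sums and differences of the weights
--     for i in weights:
--         new_d = dict(d)
--         for j in d.keys():
--             new_d[j + i] = 1
--             new_d[abs(j - i)] = 1
--         new_d[i] = 1
--         d = dict(new_d)
--
--     # Identify amounts that cannot be measured with the current weights
--     nokori = []
--     for i in amounts: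
--         if i not in d.keys():
--             nokori.append(i)
--
--     # If all amounts can be measured, return 0
--     if not nokori:
--         return 0
--
--     # Dictionary to track the minimum additional weights needed
--     ans_d = {}
--
--     # Calculate the possible additional weights needed
--     for i in nokori:
--         new_d = {}
--         for j in d.keys():
--             new_d[abs(i - j)] = 1
--             new_d[i + j] = 1
--         for j in new_d.keys():
--             if j in ans_d:
--                 ans_d[j] = ans_d[j] + 1
--             else:
--                 ans_d[j] = 1
--
--     # Find the minimum additional weight that can measure all remaining amounts
--     ans = 10 ** 12
--     for i in ans_d.keys():
--         if ans_d[i] == len(nokori):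
--             ans = min(ans, i)
--
--     # If no additional weight can help, return -1
--     if ans == 10 ** 12:
--         return -1
--
--     return ans
-- ===== SOURCE B (Python) =====
-- def find_minimum_additional_weight(n, m, amounts, weights):
--     # Reachable-amount set DP; then instead of tallying candidate weights over all
--     # unmeasurable amounts, sort the first amount's candidate weights ascending and
--     # return the FIRST one that works for every other unmeasurable amount (early
--     # exit): c works for amount a iff c-a, or (c>=0 and a-c or a+c) is reachable.
--     # Keeps A's 10**12 cap on reported answers.
--     reach = {0}
--     for w in weights:
--         reach |= {r + w for r in reach} | {abs(r - w) for r in reach} | {w}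
--     nokori = [a for a in amounts if a not in reach]
--     if not nokori:
--         return 0
--     a0, rest = nokori[0], nokori[1:]
--     cands = sorted(c for c in ({abs(a0 - r) for r in reach} | {a0 + r for r in reach})
--                    if c < 10 ** 12)
--     for c in cands:
--         if all(c - a in reach or (c >= 0 and (a - c in reach or a + c in reach)) for a in rest):
--             return c
--     return -1
-- ===== Notes on version B (the rewrite author's own statement) =====
-- stated objective: alternative
-- what changed: The answer phase replaces A's occurrence-count dictionary over every unmeasurable amount's full candidate set (then a scan for keys with full count and a running min with a 10**12 sentinel) by a sort-then-scan with early exit: sort the first unmeasurable amount's candidate weights ascending (capped below 10**12) and return the first one that passes O(1) reachability tests for each remaining amount, so no counting structure and no intersection set is ever built.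
import Mathlib
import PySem

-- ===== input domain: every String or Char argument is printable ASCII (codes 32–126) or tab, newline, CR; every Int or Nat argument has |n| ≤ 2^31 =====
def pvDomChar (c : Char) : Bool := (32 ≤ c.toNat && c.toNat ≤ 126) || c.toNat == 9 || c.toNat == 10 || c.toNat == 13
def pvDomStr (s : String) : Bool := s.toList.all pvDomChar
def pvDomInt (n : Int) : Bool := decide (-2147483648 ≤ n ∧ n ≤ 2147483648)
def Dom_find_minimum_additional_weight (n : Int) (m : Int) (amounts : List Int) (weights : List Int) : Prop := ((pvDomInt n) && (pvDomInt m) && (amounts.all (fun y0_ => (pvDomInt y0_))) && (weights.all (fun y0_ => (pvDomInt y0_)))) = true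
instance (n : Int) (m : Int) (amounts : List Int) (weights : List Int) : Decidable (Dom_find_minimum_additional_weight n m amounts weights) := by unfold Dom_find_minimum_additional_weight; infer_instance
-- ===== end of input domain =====

-- B replaces A's occurrence-count dictionary in the answer phase by sorting the first
-- unmeasurable amount's candidate weights and returning the first that works for all
-- other amounts (objective: alternative, same cost).

-- ===== PORT A =====
-- reachable-amounts step: new_d = dict(d); for j in d.keys(): new_d[j+i]=1; new_d[abs(j-i)]=1; new_d[i]=1
def pvA_step (d : PySem.Dict Int Int) (i : Int) : PySem.Dict Int Int :=
  (d.keys.foldl (fun nd j => (nd.insert (j + i) 1).insert |j - i| 1) d).insert i 1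

def pvA_d (weights : List Int) : PySem.Dict Int Int :=
  weights.foldl pvA_step ((PySem.Dict.empty).insert 0 1)

-- per-amount inner dict: new_d = {}; for j in d.keys(): new_d[abs(i-j)]=1; new_d[i+j]=1
def pvA_cand (d : PySem.Dict Int Int) (i : Int) : PySem.Dict Int Int :=
  d.keys.foldl (fun nd j => (nd.insert |i - j| 1).insert (i + j) 1) PySem.Dict.empty

-- if j in ans_d: ans_d[j] += 1 else: ans_d[j] = 1
def pvA_bump (ad : PySem.Dict Int Int) (j : Int) : PySem.Dict Int Int :=
  if ad.contains j then ad.insert j (ad.getD j 0 + 1) else ad.insert j 1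

def pvA_ansd (d : PySem.Dict Int Int) (nokori : List Int) : PySem.Dict Int Int :=
  nokori.foldl (fun ad i => (pvA_cand d i).keys.foldl pvA_bump ad) PySem.Dict.empty

def find_minimum_additional_weight (n : Int) (m : Int) (amounts : List Int) (weights : List Int) : Int :=
  let d := pvA_d weights
  let nokori := amounts.foldl (fun acc i => if d.contains i then acc else acc ++ [i]) []
  if nokori = [] then 0
  else
    let ans_d := pvA_ansd d nokori
    let ans := ans_d.keys.foldl
      (fun ans i => if ans_d.getD i 0 = (nokori.length : Int) then min ans i else ans) (10 ^ 12)
    if ans = 10 ^ 12 then -1 else ans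

-- ===== PORT B =====
-- reach |= {r + w for r in reach} | {abs(r - w) for r in reach} | {w}
def pvB_step (r : PySem.Set Int) (w : Int) : PySem.Set Int :=
  PySem.Set.update (PySem.Set.update (PySem.Set.update r
      (r.map (fun x => x + w)))
    (r.map (fun x => |x - w|))) [w]

def pvB_reach (weights : List Int) : PySem.Set Int :=
  weights.foldl pvB_step [0]

-- {abs(a0 - r) for r in reach} | {a0 + r for r in reach}
def pvB_cand (reach : PySem.Set Int) (a : Int) : PySem.Set Int :=
  PySem.Set.union (PySem.Set.ofList (reach.map (fun r => |a - r|))) (reach.map (fun r => a + r))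

-- c - a in reach or (c >= 0 and (a - c in reach or a + c in reach))
def pvB_test (reach : PySem.Set Int) (a c : Int) : Bool :=
  reach.contains (c - a) || (decide (0 ≤ c) && (reach.contains (a - c) || reach.contains (a + c)))

def find_minimum_additional_weight_alt (n : Int) (m : Int) (amounts : List Int) (weights : List Int) : Int :=
  let reach := pvB_reach weights
  let nokori := amounts.filter (fun a => !(PySem.Set.contains reach a))
  match nokori with
  | [] => 0
  | a0 :: rest =>
    let cands := PySem.List.sorted ((pvB_cand reach a0).filter (fun c => decide (c < 10 ^ 12)))
      (fun x => x) false
    match cands.find? (fun c => rest.all (fun a => pvB_test reach a c)) with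
    | some c => c
    | none => -1

-- ===== PRECONDITION & SPEC =====
def Spec_find_minimum_additional_weight (n : Int) (m : Int) (amounts : List Int) (weights : List Int) (out : Int) : Prop := out = find_minimum_additional_weight_alt n m amounts weights
instance (n : Int) (m : Int) (amounts : List Int) (weights : List Int) (out : Int) : Decidable (Spec_find_minimum_additional_weight n m amounts weights out) := by unfold Spec_find_minimum_additional_weight; infer_instance

-- ===== CLAIM (what is proved, stated in full; the proofs are below) =====
def Claim_equal_find_minimum_additional_weight : Prop := ∀ (n : Int) (m : Int) (amounts : List Int) (weights : List Int), Dom_find_minimum_additional_weight n m amounts weights → Spec_find_minimum_additional_weight n m amounts weights (find_minimum_additional_weight n m amounts weights)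

-- ===== LEMMAS AND PROOFS =====

theorem pv_foldl_two_insert_eq (l : List Int) (f g : Int → Int) (nd : PySem.Dict Int Int) :
    l.foldl (fun nd j => (nd.insert (f j) 1).insert (g j) 1) nd
      = (l.flatMap (fun j => [f j, g j])).foldl (fun nd x => nd.insert x (1 : Int)) nd := by
  induction l generalizing nd with
  | nil => rfl
  | cons x t ih => simp [ih]

theorem pv_mem_keys_two_insert (l : List Int) (f g : Int → Int) (nd : PySem.Dict Int Int) (x : Int) :
    x ∈ (l.foldl (fun nd j => (nd.insert (f j) 1).insert (g j) 1) nd).keys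
      ↔ x ∈ nd.keys ∨ ∃ j ∈ l, x = f j ∨ x = g j := by
  rw [pv_foldl_two_insert_eq,
    PySem.Dict.keys_foldl_insert (f := fun _ _ => (1 : Int))]
  simp [PySem.Set.mem_update]

theorem pv_nodup_keys_two_insert (l : List Int) (f g : Int → Int) (nd : PySem.Dict Int Int)
    (h : nd.keys.Nodup) :
    (l.foldl (fun nd j => (nd.insert (f j) 1).insert (g j) 1) nd).keys.Nodup := by
  rw [pv_foldl_two_insert_eq]
  exact PySem.Dict.nodup_keys_foldl_insert _ (fun _ _ => (1:Int)) _ h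

theorem pv_bump_eq : pvA_bump = fun ad j => ad.insert j (ad.getD j 0 + 1) := by
  funext ad j
  unfold pvA_bump
  by_cases h : ad.contains j = true
  · simp [h]
  · simp only [Bool.not_eq_true] at h
    rw [PySem.Dict.getD_of_not_contains ad 0 h]
    simp [h]

theorem pv_step_mem (d : PySem.Dict Int Int) (r : PySem.Set Int) (i : Int)
    (h : ∀ x, x ∈ d.keys ↔ x ∈ r) :
    ∀ x, x ∈ (pvA_step d i).keys ↔ x ∈ pvB_step r i := by
  intro x
  unfold pvA_step pvB_step
  rw [PySem.Dict.mem_keys_insert]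
  rw [pv_mem_keys_two_insert]
  simp [PySem.Set.mem_update, h]
  aesop

theorem pv_reach_mem (weights : List Int) :
    ∀ x, x ∈ (pvA_d weights).keys ↔ x ∈ pvB_reach weights := by
  unfold pvA_d pvB_reach
  have main : ∀ (l : List Int) (d : PySem.Dict Int Int) (r : PySem.Set Int),
      (∀ x, x ∈ d.keys ↔ x ∈ r) →
      ∀ x, x ∈ (l.foldl pvA_step d).keys ↔ x ∈ l.foldl pvB_step r := by
    intro l
    induction l with
    | nil => intro d r h x; simpa using h x
    | cons w t ih =>
      intro d r h x
      simp only [List.foldl_cons]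
      exact ih _ _ (pv_step_mem d r w h) x
  apply main
  intro x
  simp [PySem.Dict.mem_keys_insert]

theorem pv_cand_mem (d : PySem.Dict Int Int) (r : PySem.Set Int) (i : Int)
    (h : ∀ x, x ∈ d.keys ↔ x ∈ r) :
    ∀ x, x ∈ (pvA_cand d i).keys ↔ x ∈ pvB_cand r i := by
  intro x
  unfold pvA_cand pvB_cand
  rw [pv_mem_keys_two_insert]
  simp [PySem.Set.mem_union, PySem.Set.mem_ofList, h]
  aesop

theorem pv_cand_keys_nodup (d : PySem.Dict Int Int) (i : Int) : (pvA_cand d i).keys.Nodup := by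
  unfold pvA_cand
  exact pv_nodup_keys_two_insert _ _ _ _ (by simp [PySem.Dict.keys_empty])

theorem pv_ansd_getD (d : PySem.Dict Int Int) (nokori : List Int) (v : Int) :
    (pvA_ansd d nokori).getD v 0
      = ((nokori.countP (fun i => decide (v ∈ (pvA_cand d i).keys))) : Int) := by
  unfold pvA_ansd
  have main : ∀ (l : List Int) (ad : PySem.Dict Int Int),
      (l.foldl (fun ad i => (pvA_cand d i).keys.foldl pvA_bump ad) ad).getD v 0
        = ad.getD v 0 + ((l.countP (fun i => decide (v ∈ (pvA_cand d i).keys))) : Int) := by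
    intro l
    induction l with
    | nil => intro ad; simp
    | cons i t ih =>
      intro ad
      simp only [List.foldl_cons, List.countP_cons]
      rw [ih, pv_bump_eq, PySem.Dict.getD_foldl_insert_add_one,
        List.Nodup.count (pv_cand_keys_nodup d i)]
      by_cases hmem : v ∈ (pvA_cand d i).keys
      · simp [hmem]; ring
      · simp [hmem]
  rw [main]
  simp

theorem pv_ansd_mem_keys (d : PySem.Dict Int Int) (nokori : List Int) (v : Int) :
    v ∈ (pvA_ansd d nokori).keys ↔ ∃ i ∈ nokori, v ∈ (pvA_cand d i).keys := by
  unfold pvA_ansd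
  have main : ∀ (l : List Int) (ad : PySem.Dict Int Int),
      v ∈ (l.foldl (fun ad i => (pvA_cand d i).keys.foldl pvA_bump ad) ad).keys
        ↔ v ∈ ad.keys ∨ ∃ i ∈ l, v ∈ (pvA_cand d i).keys := by
    intro l
    induction l with
    | nil => intro ad; simp
    | cons i t ih =>
      intro ad
      simp only [List.foldl_cons]
      rw [ih, pv_bump_eq, PySem.Dict.keys_foldl_insert (f := fun ad j => ad.getD j 0 + 1)]
      simp [PySem.Set.mem_update]
      tauto
  rw [main]
  simp

theorem pv_test_iff (reach : PySem.Set Int) (a v : Int) :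
    pvB_test reach a v = true ↔ v ∈ pvB_cand reach a := by
  unfold pvB_test pvB_cand
  simp [PySem.Set.mem_union, PySem.Set.mem_ofList]
  constructor
  · rintro (h | ⟨hv, h | h⟩)
    · exact Or.inr ⟨v - a, h, by omega⟩
    · exact Or.inl ⟨a - v, h, by rw [abs_of_nonneg (by omega : (0:Int) ≤ a - (a - v))]; omega⟩
    · exact Or.inl ⟨a + v, h, by rw [abs_of_nonpos (by omega : a - (a + v) ≤ (0:Int))]; omega⟩
  · rintro (⟨r, hr, habs⟩ | ⟨r, hr, hadd⟩)
    · rcases abs_cases (a - r) with ⟨he, _⟩ | ⟨he, _⟩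
      · refine Or.inr ⟨by omega, Or.inl ?_⟩
        have hre : a - v = r := by omega
        rwa [hre]
      · refine Or.inr ⟨by omega, Or.inr ?_⟩
        have hre : a + v = r := by omega
        rwa [hre]
    · left
      have hre : v - a = r := by omega
      rwa [hre]

theorem pv_foldl_min_filter_lt (l : List Int) (T : Int) :
    ∀ a : Int, a ≤ T → l.foldl min a = (l.filter (fun x => decide (x < T))).foldl min a := by
  induction l with
  | nil => intro a _; rfl
  | cons x t ih =>
    intro a ha
    by_cases hx : x < T
    · simp only [List.filter_cons, hx, decide_true, List.foldl_cons]
      exact ih _ (le_trans (min_le_left _ _) ha)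
    · simp only [List.filter_cons, hx, decide_false, List.foldl_cons]
      rw [min_eq_left (le_trans ha (not_lt.mp hx)), ih _ ha]
      simp

theorem pv_main (n : Int) (m : Int) (amounts : List Int) (weights : List Int) :
    find_minimum_additional_weight n m amounts weights
      = find_minimum_additional_weight_alt n m amounts weights := by
  unfold find_minimum_additional_weight find_minimum_additional_weight_alt
  dsimp only
  have hdr := pv_reach_mem weights
  set d := pvA_d weights with hd
  set reach := pvB_reach weights with hr
  -- the two nokori lists are equal
  have hfun : (fun (acc : List Int) i => if d.contains i then acc else acc ++ [i])
      = (fun acc i => if (!d.contains i) = true then acc ++ [id i] else acc) := by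
    funext acc i; cases h : d.contains i <;> simp [h]
  have hnok : amounts.foldl (fun acc i => if d.contains i then acc else acc ++ [i]) []
      = amounts.filter (fun a => !(PySem.Set.contains reach a)) := by
    rw [hfun, PySem.List.foldl_append_if]
    simp only [List.map_id, List.nil_append]
    apply List.filter_congr
    intro x _
    have hcc : d.contains x = reach.contains x := by
      rw [Bool.eq_iff_iff, PySem.Dict.contains_iff_mem_keys, PySem.Set.contains_iff]
      exact hdr x
    rw [hcc]
  rw [hnok]
  cases hnk : amounts.filter (fun a => !(PySem.Set.contains reach a)) with
  | nil => simp
  | cons a rest =>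
    simp only [if_neg (by simp : ¬(a :: rest = []))]
    set ansd := pvA_ansd d (a :: rest) with hansd
    set L : Int := ((a :: rest).length : Int) with hL
    -- A's fold restricted to the full-count keys
    have hfold : (fun (ans : Int) i => if ansd.getD i 0 = L then min ans i else ans)
        = (fun ans i => if (fun i => decide (ansd.getD i 0 = L)) i = true then min ans i else ans) := by
      funext ans i; by_cases h : ansd.getD i 0 = L <;> simp [h]
    rw [hfold, ← List.foldl_filter]
    set FK := ansd.keys.filter (fun i => decide (ansd.getD i 0 = L)) with hFK
    rw [pv_foldl_min_filter_lt FK (10 ^ 12) (10 ^ 12) le_rfl]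
    set AF := FK.filter (fun x => decide (x < 10 ^ 12)) with hAF
    -- B's sorted candidate list and survivor list
    set p : Int → Bool := fun c => rest.all (fun x => pvB_test reach x c) with hp
    set cands := PySem.List.sorted ((pvB_cand reach a).filter (fun c => decide (c < 10 ^ 12)))
      (fun x => x) false with hcands
    have hfind : cands.find? p = (cands.filter p).head? := List.head?_filter.symm
    set SF := cands.filter p with hSF
    -- membership characterisations
    have hcnt : ∀ v, (ansd.getD v 0 = L) ↔ ∀ i ∈ a :: rest, v ∈ (pvA_cand d i).keys := by
      intro v
      rw [hansd, pv_ansd_getD, hL]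
      rw [Int.natCast_inj, List.countP_eq_length]
      simp
    have hFKmem : ∀ v, v ∈ FK ↔ ∀ i ∈ a :: rest, v ∈ pvB_cand reach i := by
      intro v
      rw [hFK]
      simp only [List.mem_filter, decide_eq_true_eq]
      constructor
      · rintro ⟨_, hc⟩ i hi
        exact (pv_cand_mem d reach i hdr v).1 ((hcnt v).1 hc i hi)
      · intro h
        have hA : ∀ i ∈ a :: rest, v ∈ (pvA_cand d i).keys :=
          fun i hi => (pv_cand_mem d reach i hdr v).2 (h i hi)
        exact ⟨(pv_ansd_mem_keys d _ v).2 ⟨a, by simp, hA a (by simp)⟩, (hcnt v).2 hA⟩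
    have hmem : ∀ v, v ∈ SF ↔ v ∈ AF := by
      intro v
      rw [hSF, hAF, List.mem_filter, List.mem_filter, hcands, PySem.List.mem_sorted,
        List.mem_filter, hFKmem v]
      simp only [hp, List.all_eq_true, decide_eq_true_eq]
      constructor
      · rintro ⟨⟨hc, hlt⟩, hall⟩
        refine ⟨?_, hlt⟩
        intro i hi
        rcases List.mem_cons.1 hi with rfl | hi
        · exact hc
        · exact (pv_test_iff reach i v).1 (hall i hi)
      · rintro ⟨hall, hlt⟩
        exact ⟨⟨hall a (by simp), hlt⟩, fun i hi => (pv_test_iff reach i v).2 (hall i (by simp [hi]))⟩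
    -- the sorted survivor list is pairwise ≤
    have hpw : SF.Pairwise (· ≤ ·) := by
      rw [hSF]
      exact List.Pairwise.filter _ (PySem.List.sorted_pairwise _ _)
    rw [hfind]
    cases hSFc : SF with
    | nil =>
      have hAFnil : AF = [] := by
        rw [List.eq_nil_iff_forall_not_mem]
        intro v hv
        have := (hmem v).2 hv
        rw [hSFc] at this
        simp at this
      rw [hAFnil]
      simp
    | cons h t =>
      have hhmem : h ∈ AF := (hmem h).1 (by rw [hSFc]; simp)
      have hhlt : h < 10 ^ 12 := by
        have := List.mem_filter.1 (hAF ▸ hhmem)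
        simpa using this.2
      have hhle : ∀ v ∈ AF, h ≤ v := by
        intro v hv
        have hvSF := (hmem v).2 hv
        rw [hSFc] at hvSF
        rcases List.mem_cons.1 hvSF with rfl | hv'
        · exact le_refl v
        · rw [hSFc] at hpw
          exact (List.pairwise_cons.1 hpw).1 v hv'
      have heq : AF.foldl min (10 ^ 12) = h := by
        apply le_antisymm
        · exact (PySem.List.foldl_min_le AF (10 ^ 12)).2 _ hhmem
        · rcases PySem.List.foldl_min_mem AF (10 ^ 12) with hm | hm
          · rw [hm]; exact le_of_lt hhlt
          · exact hhle _ hm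
      rw [heq, if_neg (by omega)]
      simp

-- ===== VERDICT (by name: the statement is the Claim_ definition above) =====
theorem find_minimum_additional_weight_spec : Claim_equal_find_minimum_additional_weight := by
  intro n m amounts weights _
  unfold Spec_find_minimum_additional_weight
  exact pv_main n m amounts weights
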